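-- pv_equiv track=rewrite | github.com/ThomasTrepanier/log6307-final-project | data/pyscent/stackoverflow/code-dump/18503_84.py | hillorvalley
-- ===== SOURCE A (Python) =====
-- def hillorvalley(seq):
--     is_dec, is_inc = False, False
--     inflections = 0
--     for i in range(len(seq)-1):
--         if inflections > 1:
--             # Early stop if more than 1 inflection
--             return False
--         right = seq[i+1]
--         middle = seq[i]
--         diff = right - middle
--         if diff > 0:
--             if is_dec:
--                 inflections += 1
--             is_inc = True
--             is_dec = False
--         elif diff < 0:
--             if is_inc:
--                 inflections += 1
--             is_dec = True
--             is_inc = False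
--     if inflections == 1:
--         return True
--     return False
-- ===== SOURCE B (Python) =====
-- def hillorvalley(seq):
--     signs = []
--     for a, b in zip(seq, seq[1:]):
--         d = b - a
--         if d != 0:
--             signs.append(1 if d > 0 else -1)
--     changes = sum(1 for x, y in zip(signs, signs[1:]) if x != y)
--     return changes == 1
-- ===== Notes on version B (the rewrite author's own statement) =====
-- stated objective: alternative
-- what changed: Replaces A's single stateful accumulator loop (is_dec/is_inc flags, inflection counter, early return) with a two-pass decomposition: first build the list of nonzero difference signs, then count adjacent sign changes and compare with 1.
import Mathlib
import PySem

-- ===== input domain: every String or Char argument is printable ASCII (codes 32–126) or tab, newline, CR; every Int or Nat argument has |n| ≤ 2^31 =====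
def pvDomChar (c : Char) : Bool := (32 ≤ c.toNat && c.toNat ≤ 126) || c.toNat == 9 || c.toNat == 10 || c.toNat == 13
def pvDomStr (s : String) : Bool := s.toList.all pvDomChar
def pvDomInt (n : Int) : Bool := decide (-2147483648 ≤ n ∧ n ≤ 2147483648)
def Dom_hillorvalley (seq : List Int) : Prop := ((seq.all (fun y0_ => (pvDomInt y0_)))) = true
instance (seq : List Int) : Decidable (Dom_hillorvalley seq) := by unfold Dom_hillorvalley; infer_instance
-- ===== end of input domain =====

-- B rewrites A's single stateful flag/counter loop as: build the list of nonzero diff signs, then count adjacent sign changes (alternative decomposition, same cost).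

-- ===== PORT A =====
-- the for-loop over range(len(seq)-1) with early return, carrying (is_dec, is_inc, inflections)
def hillorvalleyLoop (seq : List Int) : List Int → Bool → Bool → Int → Bool
  | [], _, _, inflections => if inflections == 1 then true else false
  | i :: rest, is_dec, is_inc, inflections =>
    if inflections > 1 then false
    else
      let right := PySem.List.pyGetD seq (i + 1) 0
      let middle := PySem.List.pyGetD seq i 0
      let diff := right - middle
      if diff > 0 then
        hillorvalleyLoop seq rest false true (if is_dec then inflections + 1 else inflections)
      else if diff < 0 then
        hillorvalleyLoop seq rest true false (if is_inc then inflections + 1 else inflections)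
      else
        hillorvalleyLoop seq rest is_dec is_inc inflections

def hillorvalley (seq : List Int) : Bool :=
  hillorvalleyLoop seq (PySem.List.pyRange 0 ((seq.length : Int) - 1) 1) false false 0

-- ===== PORT B =====
def hillorvalley_alt (seq : List Int) : Bool :=
  let signs := (List.zip seq seq.tail).foldl
    (fun acc ab =>
      let d := ab.2 - ab.1
      if d ≠ 0 then acc ++ [if d > 0 then (1 : Int) else -1] else acc) []
  let changes := (List.zip signs signs.tail).foldl
    (fun c xy => if xy.1 ≠ xy.2 then c + 1 else c) (0 : Int)
  changes == 1

-- ===== PRECONDITION & SPEC =====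
def Spec_hillorvalley (seq : List Int) (out : Bool) : Prop := out = hillorvalley_alt seq
instance (seq : List Int) (out : Bool) : Decidable (Spec_hillorvalley seq out) := by unfold Spec_hillorvalley; infer_instance

-- ===== CLAIM (what is proved, stated in full; the proofs are below) =====
def Claim_equal_hillorvalley : Prop := ∀ (seq : List Int), Dom_hillorvalley seq → Spec_hillorvalley seq (hillorvalley seq)

-- ===== LEMMAS AND PROOFS =====

-- proof-side recursive sign list of a pair list
def sgnR : List (Int × Int) → List Int
  | [] => []
  | (a, b) :: r => if b - a > 0 then 1 :: sgnR r else if b - a < 0 then -1 :: sgnR r else sgnR r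

-- transitions counted from an optional previous sign
def tF : Option Int → List Int → Int
  | _, [] => 0
  | none, s :: r => tF (some s) r
  | some p, s :: r => (if p ≠ s then 1 else 0) + tF (some s) r

lemma tF_nonneg (o : Option Int) (l : List Int) : 0 ≤ tF o l := by
  induction l generalizing o with
  | nil => cases o <;> simp [tF]
  | cons s r ih =>
    cases o with
    | none => simpa [tF] using ih (some s)
    | some p => have := ih (some s); simp [tF]; split_ifs <;> omega

-- the pair-list version of A's loop
def loopP : List (Int × Int) → Bool → Bool → Int → Bool
  | [], _, _, inflections => if inflections == 1 then true else false
  | (a, b) :: rest, is_dec, is_inc, inflections =>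
    if inflections > 1 then false
    else
      let diff := b - a
      if diff > 0 then loopP rest false true (if is_dec then inflections + 1 else inflections)
      else if diff < 0 then loopP rest true false (if is_inc then inflections + 1 else inflections)
      else loopP rest is_dec is_inc inflections

-- A's index loop equals the pair-list loop
lemma loopA_eq_loopP (seq : List Int) :
    ∀ (m k : Nat), k + m = seq.length - 1 →
    ∀ (d i : Bool) (c : Int),
      hillorvalleyLoop seq (PySem.List.pyRange (k : Int) ((seq.length : Int) - 1) 1) d i c
        = loopP ((List.zip seq seq.tail).drop k) d i c := by
  intro m
  induction m with
  | zero =>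
    intro k hk d i c
    have h1 : ((seq.length : Int) - 1) ≤ (k : Int) := by omega
    have h2 : (List.zip seq seq.tail).length ≤ k := by
      simp [List.length_zip]; omega
    rw [PySem.List.pyRange_one_eq_nil h1, List.drop_eq_nil_of_le h2]
    rfl
  | succ m ih =>
    intro k hk d i c
    have hkn : k + 1 < seq.length := by omega
    have hlt : (k : Int) < (seq.length : Int) - 1 := by
      have := hkn; omega
    rw [PySem.List.pyRange_one_cons hlt]
    have hzlen : k < (List.zip seq seq.tail).length := by
      simp [List.length_zip, List.length_tail]; omega
    rw [List.drop_eq_getElem_cons hzlen]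
    have hget : (List.zip seq seq.tail)[k] = (seq[k]'(by omega), seq[k+1]'hkn) := by
      simp [List.getElem_zip, List.getElem_tail]
    have hmid : PySem.List.pyGetD seq (k : Int) 0 = seq[k]'(by omega) := by
      rw [PySem.List.pyGetD_natCast]; exact List.getD_eq_getElem _ _ _
    have hright : PySem.List.pyGetD seq (((k + 1 : Nat) : Int)) 0 = seq[k+1]'hkn := by
      rw [PySem.List.pyGetD_natCast]; exact List.getD_eq_getElem _ _ _
    have hcast : (k : Int) + 1 = ((k + 1 : Nat) : Int) := by push_cast; ring
    rw [hget]
    simp only [hillorvalleyLoop, loopP, hcast, hmid, hright]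
    by_cases hc : c > 1
    · simp [hc]
    · simp only [if_neg hc]
      by_cases h1 : seq[k+1]'hkn - seq[k]'(by omega) > 0
      · simp only [if_pos h1]; exact ih (k + 1) (by omega) _ _ _
      · simp only [if_neg h1]
        by_cases h2 : seq[k+1]'hkn - seq[k]'(by omega) < 0
        · simp only [if_pos h2]; exact ih (k + 1) (by omega) _ _ _
        · simp only [if_neg h2]; exact ih (k + 1) (by omega) _ _ _

-- the pair-list loop computes "inflections + transitions from the current state == 1"
lemma loopP_tF (ps : List (Int × Int)) :
    ∀ c : Int,
      (loopP ps false false c = decide (c + tF none (sgnR ps) = 1)) ∧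
      (loopP ps true false c = decide (c + tF (some (-1)) (sgnR ps) = 1)) ∧
      (loopP ps false true c = decide (c + tF (some 1) (sgnR ps) = 1)) := by
  induction ps with
  | nil =>
    intro c
    refine ⟨?_, ?_, ?_⟩ <;> simp [loopP, sgnR, tF]
  | cons ab rest ih =>
    intro c
    obtain ⟨a, b⟩ := ab
    have hnn : ∀ o, 0 ≤ tF o (sgnR ((a, b) :: rest)) := fun o => tF_nonneg o _
    refine ⟨?_, ?_, ?_⟩ <;>
    · by_cases hc : c > 1
      · have := hnn none; have := hnn (some (-1)); have := hnn (some 1)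
        simp only [loopP, if_pos hc]
        have h1 : ∀ o, ¬ (c + tF o (sgnR ((a,b) :: rest)) = 1) := by
          intro o; have := tF_nonneg o (sgnR ((a,b) :: rest)); omega
        simp [h1]
      · simp only [loopP, if_neg hc, sgnR]
        by_cases h1 : b - a > 0
        · simp only [if_pos h1, tF]
          rcases ih c with ⟨_, _, h3⟩
          rcases ih (c+1) with ⟨_, _, h3'⟩
          simp [h3, h3'] <;> omega
        · by_cases h2 : b - a < 0
          · simp only [if_neg h1, if_pos h2, tF]
            rcases ih c with ⟨_, h3, _⟩
            rcases ih (c+1) with ⟨_, h3', _⟩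
            simp [h3, h3'] <;> omega
          · simp only [if_neg h1, if_neg h2]
            rcases ih c with ⟨g1, g2, g3⟩
            simp [g1, g2, g3]

-- B's foldl-built sign list is sgnR
lemma signs_eq_sgnR (ps : List (Int × Int)) (acc : List Int) :
    ps.foldl (fun acc ab => let d := ab.2 - ab.1;
        if d ≠ 0 then acc ++ [if d > 0 then (1 : Int) else -1] else acc) acc
      = acc ++ sgnR ps := by
  induction ps generalizing acc with
  | nil => simp [sgnR]
  | cons ab rest ih =>
    obtain ⟨a, b⟩ := ab
    rw [List.foldl_cons, ih]
    show (if b - a ≠ 0 then acc ++ [if b - a > 0 then (1 : Int) else -1] else acc) ++ sgnR rest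
        = acc ++ sgnR ((a, b) :: rest)
    simp only [sgnR]
    by_cases h1 : b - a > 0
    · have hne : b - a ≠ 0 := by omega
      rw [if_pos hne, if_pos h1, if_pos h1, List.append_assoc]
      rfl
    · by_cases h2 : b - a < 0
      · have hne : b - a ≠ 0 := by omega
        rw [if_pos hne, if_neg h1, if_neg h1, if_pos h2, List.append_assoc]
        rfl
      · have heq : ¬ (b - a ≠ 0) := by omega
        rw [if_neg heq, if_neg h1, if_neg h2]

-- B's transition count as tF
lemma count_zip_tF (l : List Int) :
    ∀ (p : Int) (c : Int),
      (List.zip (p :: l) l).foldl (fun c xy => if xy.1 ≠ xy.2 then c + 1 else c) c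
        = c + tF (some p) l := by
  induction l with
  | nil => intro p c; simp [tF]
  | cons s r ih =>
    intro p c
    rw [show List.zip (p :: s :: r) (s :: r) = (p, s) :: List.zip (s :: r) r from rfl,
        List.foldl_cons]
    show (List.zip (s :: r) r).foldl (fun c xy => if xy.1 ≠ xy.2 then c + 1 else c)
        (if p ≠ s then c + 1 else c) = c + tF (some p) (s :: r)
    by_cases h : p ≠ s
    · rw [if_pos h, ih s (c + 1)]
      simp only [tF, if_pos h]; omega
    · rw [if_neg h, ih s c]
      simp only [tF, if_neg h]; omega

lemma changes_eq_tF (l : List Int) :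
    (List.zip l l.tail).foldl (fun c xy => if xy.1 ≠ xy.2 then c + 1 else c) (0 : Int)
      = tF none l := by
  cases l with
  | nil => simp [tF]
  | cons s r => simpa [tF] using count_zip_tF r s 0

-- ===== VERDICT (by name: the statement is the Claim_ definition above) =====
theorem hillorvalley_spec : Claim_equal_hillorvalley := by
  intro seq _
  unfold Spec_hillorvalley hillorvalley hillorvalley_alt
  have hb := loopA_eq_loopP seq (seq.length - 1) 0 (by omega) false false 0
  simp only [Nat.cast_zero, List.drop_zero] at hb
  rw [hb, signs_eq_sgnR, List.nil_append]
  show loopP (seq.zip seq.tail) false false 0 =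
    ((List.zip (sgnR (seq.zip seq.tail)) (sgnR (seq.zip seq.tail)).tail).foldl
      (fun c xy => if xy.1 ≠ xy.2 then c + 1 else c) 0 == 1)
  rw [changes_eq_tF, (loopP_tF (seq.zip seq.tail) 0).1]
  rw [Int.zero_add]
  cases h : tF none (sgnR (seq.zip seq.tail)) == 1 with
  | true => simp at h; simp [h]
  | false => simp at h; simp [h]
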